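-- pv_equiv track=rewrite | github.com/csv610/SophoBench | model_query.py | is_valid_mcq_response
-- ===== SOURCE A (Python) =====
-- def is_valid_mcq_response(response, num_options):
--     response = response.strip().upper()
--     if len(response) != 1:
--         return False
--
--     # Ensure the answer is a valid choice
--     valid_choices = [chr(65 + i) for i in range(num_options)]
--     if response in valid_choices:
--         return True
--
--     return False
-- ===== SOURCE B (Python) =====
-- def is_valid_mcq_response(response, num_options):
--     response = response.strip().upper()
--     if len(response) != 1:
--         return False
--     # direct ordinal range check instead of building and scanning the letter list
--     return 0 <= ord(response) - 65 < num_options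
-- ===== Notes on version B (the rewrite author's own statement) =====
-- stated objective: simpler
-- what changed: B replaces the materialized list of valid letters and the membership scan with a constant-time ordinal range check (0 <= ord(response)-65 < num_options).
-- crash fix: When the stripped response has length 1 and num_options >= 1114048, A raises ValueError (chr() arg out of range) while B returns the ordinal-range verdict (e.g. True for 'A'). — e.g. on is_valid_mcq_response("A", 1114048): A raises ValueError, B returns true
import Mathlib
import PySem

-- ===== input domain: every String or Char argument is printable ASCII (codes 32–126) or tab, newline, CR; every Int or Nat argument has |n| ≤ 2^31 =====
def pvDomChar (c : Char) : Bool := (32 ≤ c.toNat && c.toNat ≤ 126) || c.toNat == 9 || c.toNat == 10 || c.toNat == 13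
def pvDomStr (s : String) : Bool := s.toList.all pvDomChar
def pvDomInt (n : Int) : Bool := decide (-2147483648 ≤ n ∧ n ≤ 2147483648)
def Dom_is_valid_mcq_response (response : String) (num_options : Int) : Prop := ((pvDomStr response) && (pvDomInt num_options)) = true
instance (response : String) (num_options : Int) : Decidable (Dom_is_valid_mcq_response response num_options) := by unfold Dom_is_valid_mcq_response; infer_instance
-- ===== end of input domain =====

-- B replaces A's materialized list of valid letters and membership scan with a
-- constant-time ordinal range check; same value on every input A returns on.


-- ===== PORT A =====
-- chr(65+i) ported as Char.ofNat; exact for every valid (non-surrogate) codepoint,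
-- and on Dom inputs (ASCII response) the membership test below is unaffected by
-- the surrogate gap (Char.ofNat yields code 0 there, never an ASCII char).
def is_valid_mcq_response (response : String) (num_options : Int) : Bool :=
  let r := PySem.Str.upper (PySem.Str.strip response)
  if PySem.Str.len r != 1 then false
  else
    let valid_choices := (PySem.List.pyRange 0 num_options).map (fun i => String.ofList [Char.ofNat (65 + i).toNat])
    if r ∈ valid_choices then true else false

-- ===== PORT B =====
def is_valid_mcq_response_alt (response : String) (num_options : Int) : Bool :=
  let r := PySem.Str.upper (PySem.Str.strip response)
  if PySem.Str.len r != 1 then false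
  else
    match r.toList with
    | [c] => decide (0 ≤ (c.toNat : Int) - 65 ∧ (c.toNat : Int) - 65 < num_options)
    | _ => false

-- ===== PRECONDITION & SPEC =====
-- Pre_ excludes exactly the inputs on which Python A raises ValueError:
-- a length-1 stripped response together with num_options ≥ 1114048 makes
-- chr(65+i) exceed 0x10FFFF inside the comprehension.
def Pre_is_valid_mcq_response (response : String) (num_options : Int) : Prop :=
  num_options ≤ 1114047 ∨ PySem.Str.len (PySem.Str.strip response) ≠ 1
instance (response : String) (num_options : Int) : Decidable (Pre_is_valid_mcq_response response num_options) := by unfold Pre_is_valid_mcq_response; infer_instance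

def pvWitness_is_valid_mcq_response : String × Int := (" b ", 3)

-- A raises ValueError (chr() arg not in range(0x110000)) when the stripped response
-- has length 1 and num_options ≥ 1114048; B returns the ordinal-range verdict there.
def Raises_is_valid_mcq_response (response : String) (num_options : Int) : Prop :=
  PySem.Str.len (PySem.Str.strip response) = 1 ∧ 1114048 ≤ num_options
instance (response : String) (num_options : Int) : Decidable (Raises_is_valid_mcq_response response num_options) := by unfold Raises_is_valid_mcq_response; infer_instance
def pvRaiseWitness_is_valid_mcq_response : String × Int := ("A", 1114048)
def pvRaiseWitnessOut_is_valid_mcq_response : Bool := true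

def Spec_is_valid_mcq_response (response : String) (num_options : Int) (out : Bool) : Prop := out = is_valid_mcq_response_alt response num_options
instance (response : String) (num_options : Int) (out : Bool) : Decidable (Spec_is_valid_mcq_response response num_options out) := by unfold Spec_is_valid_mcq_response; infer_instance

-- ===== CLAIM (what is proved, stated in full; the proofs are below) =====
def Claim_equal_is_valid_mcq_response : Prop := ∀ (response : String) (num_options : Int), Dom_is_valid_mcq_response response num_options → Pre_is_valid_mcq_response response num_options → Spec_is_valid_mcq_response response num_options (is_valid_mcq_response response num_options)

def Claim_raises_is_valid_mcq_response : Prop := (∀ (response : String) (num_options : Int), Dom_is_valid_mcq_response response num_options → Raises_is_valid_mcq_response response num_options → ¬ Pre_is_valid_mcq_response response num_options) ∧ (Dom_is_valid_mcq_response (pvRaiseWitness_is_valid_mcq_response.1) (pvRaiseWitness_is_valid_mcq_response.2) ∧ Raises_is_valid_mcq_response (pvRaiseWitness_is_valid_mcq_response.1) (pvRaiseWitness_is_valid_mcq_response.2) ∧ is_valid_mcq_response_alt (pvRaiseWitness_is_valid_mcq_response.1) (pvRaiseWitness_is_valid_mcq_response.2) = pvRaiseWitnessOut_is_valid_mcq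_response)

-- ===== LEMMAS AND PROOFS =====

-- any character of upper(strip s) for a Dom string s has code in [9, 126]
lemma upper_strip_char_bounds (s : String) (hDom : pvDomStr s = true)
    (c : Char) (hc : c ∈ (PySem.Str.upper (PySem.Str.strip s)).toList) :
    9 ≤ c.toNat ∧ c.toNat ≤ 126 := by
  rw [PySem.Str.toList_upper, PySem.Str.toList_strip] at hc
  simp only [PySem.Chars.upper, List.mem_map] at hc
  obtain ⟨c', hc', rfl⟩ := hc
  have hmem : c' ∈ s.toList := by
    have h1 : c' ∈ PySem.Chars.lstrip s.toList := by
      simp only [PySem.Chars.strip, PySem.Chars.rstrip] at hc'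
      have := (List.dropWhile_sublist (l := (PySem.Chars.lstrip s.toList).reverse)
        (p := PySem.Chars.isspace)).mem (by simpa using hc')
      simpa using this
    exact (List.dropWhile_sublist (l := s.toList) (p := PySem.Chars.isspace)).mem h1
  have hd : pvDomChar c' = true := by
    have := List.all_eq_true.mp hDom c' hmem
    simpa using this
  simp only [pvDomChar, Bool.or_eq_true, Bool.and_eq_true, decide_eq_true_eq, beq_iff_eq] at hd
  simp only [PySem.Chars.upperChar, PySem.Chars.islower]
  split
  · next h =>
    simp only [Bool.and_eq_true, decide_eq_true_eq, Char.le_def] at h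
    have hv : Nat.isValidChar (c'.toNat - 32) := by
      refine Or.inl ?_
      have : c'.toNat ≤ 122 := h.2
      omega
    rw [show (Char.ofNat (c'.toNat - 32)).toNat = c'.toNat - 32 by
      simp [Char.ofNat, hv]]
    have : 97 ≤ c'.toNat := h.1
    omega
  · omega

-- the membership in A's generated letter list, characterised arithmetically
lemma mem_valid_choices_iff (c : Char) (n : Int)
    (hlo : 9 ≤ c.toNat) (hhi : c.toNat ≤ 126) :
    (String.ofList [c] ∈ (PySem.List.pyRange 0 n).map (fun i => String.ofList [Char.ofNat (65 + i).toNat]))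
      ↔ (0 ≤ (c.toNat : Int) - 65 ∧ (c.toNat : Int) - 65 < n) := by
  simp only [List.mem_map, PySem.List.mem_pyRange_one]
  constructor
  · rintro ⟨i, ⟨hi0, hin⟩, heq⟩
    have hchar : Char.ofNat (65 + i).toNat = c := by
      have h := congrArg String.toList heq
      simp only [String.toList_ofList] at h
      exact List.head_eq_of_cons_eq h
    set k := (65 + i).toNat with hk
    have hki : (k : Int) = 65 + i := by omega
    by_cases hv : Nat.isValidChar k
    · have : (Char.ofNat k).toNat = k := by simp [Char.ofNat, hv]
      rw [hchar] at this
      omega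
    · have h0 : (Char.ofNat k).toNat = 0 := by simp [Char.ofNat, hv]
      rw [hchar] at h0
      omega
  · rintro ⟨h0, hn⟩
    refine ⟨(c.toNat : Int) - 65, ⟨by omega, hn⟩, ?_⟩
    have : ((65 : Int) + ((c.toNat : Int) - 65)).toNat = c.toNat := by omega
    rw [this, Char.ofNat_toNat]

-- ===== VERDICT (by name: the statement is the Claim_ definition above) =====
theorem is_valid_mcq_response_spec : Claim_equal_is_valid_mcq_response := by
  intro response n hDom _
  unfold Spec_is_valid_mcq_response
  simp only [is_valid_mcq_response, is_valid_mcq_response_alt]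
  have hDomS : pvDomStr response = true := by
    simp only [Dom_is_valid_mcq_response, Bool.and_eq_true] at hDom
    exact hDom.1
  set r := PySem.Str.upper (PySem.Str.strip response) with hr
  by_cases hlen : PySem.Str.len r = 1
  · have hc0 : (PySem.Str.len r != 1) = false := by rw [hlen]; rfl
    rw [hc0]
    simp only [Bool.false_eq_true, if_false]
    have hlen1 : r.toList.length = 1 := by
      rw [PySem.Str.len_eq] at hlen; omega
    obtain ⟨c, hc⟩ := List.length_eq_one_iff.mp hlen1
    have hcm : c ∈ r.toList := by rw [hc]; exact List.mem_singleton.mpr rfl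
    obtain ⟨hlo, hhi⟩ := upper_strip_char_bounds response hDomS c hcm
    have hrs : r = String.ofList [c] := by
      rw [← String.ofList_toList (s := r), hc]
    have hiff := hrs ▸ mem_valid_choices_iff c n hlo hhi
    rw [hc]
    by_cases h : (0 ≤ (c.toNat : Int) - 65 ∧ (c.toNat : Int) - 65 < n)
    · rw [if_pos (hiff.mpr h)]
      exact (decide_eq_true h).symm
    · rw [if_neg (fun hm => h (hiff.mp hm))]
      exact (decide_eq_false h).symm
  · have hc1 : (PySem.Str.len r != 1) = true := bne_iff_ne.mpr hlen
    rw [hc1]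
    simp only [if_true]

@[simp] theorem is_valid_mcq_response_raises : Claim_raises_is_valid_mcq_response := by
  unfold Claim_raises_is_valid_mcq_response
  constructor
  · intro response n _ hR hP
    rcases hR with ⟨h1, h2⟩
    rcases hP with h | h
    · omega
    · exact h h1
  · refine ⟨by decide, by decide, by decide⟩
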